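-- pv_equiv track=rewrite | github.com/JoeMachado62/VHC-Inventory-Scrapper | ove_scraper/cr_parsers.py | _pairwise_mechanical_findings
-- ===== SOURCE A (Python) =====
-- def _pairwise_mechanical_findings(lines: list[str]) -> list[tuple[str, str]]:
--     known_labels = {
--         "DIAGNOSTIC TROUBLE CODES",
--         "WARNING LIGHTS & GAUGE CLUSTER",
--         "VEHICLE SMOKE",
--         "EMISSIONS/CATALYTIC/EXHAUST",
--         "ACTIVE VISIBLE LEAKS FROM ENGINE OR UNDERCARRIAGE AREA",
--         "ENGINE NOISE",
--         "ENGINE OIL SLUDGE",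
--         "OTHER MECHANICAL COMMENTS",
--         "NOTE:",
--     }
--     findings: list[tuple[str, str]] = []
--     index = 0
--     while index < len(lines) - 1:
--         current = lines[index]
--         nxt = lines[index + 1]
--         if current not in known_labels:
--             index += 1
--             continue
--         findings.append((current, nxt))
--         index += 2
--     return findings
-- ===== SOURCE B (Python) =====
-- def _pairwise_mechanical_findings(lines: list[str]) -> list[tuple[str, str]]:
--     known_labels = {
--         "DIAGNOSTIC TROUBLE CODES",
--         "WARNING LIGHTS & GAUGE CLUSTER",
--         "VEHICLE SMOKE",
--         "EMISSIONS/CATALYTIC/EXHAUST",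
--         "ACTIVE VISIBLE LEAKS FROM ENGINE OR UNDERCARRIAGE AREA",
--         "ENGINE NOISE",
--         "ENGINE OIL SLUDGE",
--         "OTHER MECHANICAL COMMENTS",
--         "NOTE:",
--     }
--     # Within each maximal run of consecutive label lines, the even-position
--     # labels are the ones that get paired, each with its successor (which is
--     # the next label in the run, or the non-label line terminating the run).
--     findings: list[tuple[str, str]] = []
--     run: list[str] = []
--     for line in lines:
--         if line in known_labels:
--             run.append(line)
--         else:
--             findings.extend(zip(run[0::2], run[1::2] + [line]))
--             run = []
--     findings.extend(zip(run[0::2], run[1::2]))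
--     return findings
-- ===== Notes on version B (the rewrite author's own statement) =====
-- stated objective: alternative
-- what changed: B buffers each maximal run of consecutive label lines and emits all of that run's pairs at once by zipping the run's even-position elements with its odd-position elements (plus the line that terminates the run), instead of A's index-based while loop that pairs as it scans with +1/+2 index bumps.
import Mathlib
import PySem

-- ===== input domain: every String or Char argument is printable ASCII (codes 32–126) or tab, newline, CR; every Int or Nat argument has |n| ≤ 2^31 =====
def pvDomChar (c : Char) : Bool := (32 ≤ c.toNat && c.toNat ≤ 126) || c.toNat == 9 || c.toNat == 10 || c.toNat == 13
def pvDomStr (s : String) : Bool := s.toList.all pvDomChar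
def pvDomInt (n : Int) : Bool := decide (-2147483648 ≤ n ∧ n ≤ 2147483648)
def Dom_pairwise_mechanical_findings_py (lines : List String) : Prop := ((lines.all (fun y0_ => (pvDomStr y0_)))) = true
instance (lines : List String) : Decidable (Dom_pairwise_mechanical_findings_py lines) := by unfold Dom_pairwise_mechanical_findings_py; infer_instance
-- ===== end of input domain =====

-- B buffers maximal runs of consecutive label lines and pairs each run by zipping its even- and odd-position elements (alternative algorithm, same cost); A pairs as it scans with an index loop.


def knownLabels : List String :=
  ["DIAGNOSTIC TROUBLE CODES",
   "WARNING LIGHTS & GAUGE CLUSTER",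
   "VEHICLE SMOKE",
   "EMISSIONS/CATALYTIC/EXHAUST",
   "ACTIVE VISIBLE LEAKS FROM ENGINE OR UNDERCARRIAGE AREA",
   "ENGINE NOISE",
   "ENGINE OIL SLUDGE",
   "OTHER MECHANICAL COMMENTS",
   "NOTE:"]

-- ===== PORT A =====
-- A's while loop over an index, with +1 / +2 bumps and an accumulator.
def pwA_loop (lines : List String) (index : Nat) (findings : List (String × String)) :
    List (String × String) :=
  if h : index + 1 < lines.length then
    let current := lines[index]
    let nxt := lines[index + 1]
    if current ∉ knownLabels then
      pwA_loop lines (index + 1) findings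
    else
      pwA_loop lines (index + 2) (findings ++ [(current, nxt)])
  else findings
termination_by lines.length - index

def pairwise_mechanical_findings_py (lines : List String) : List (String × String) :=
  pwA_loop lines 0 []

-- ===== PORT B =====
-- Hand ports of Python's step-2 slices: evens = xs[0::2], odds = xs[1::2] (exact on all lists).
def evens {α : Type} : List α → List α
  | [] => []
  | [x] => [x]
  | x :: _ :: t => x :: evens t

def odds {α : Type} : List α → List α
  | [] => []
  | _ :: t => evens t

-- The loop body: label lines accumulate into the current run; a non-label line
-- flushes the run's pairs (zip of even-slice with odd-slice plus the terminator).
def pwB_step (st : List (String × String) × List String) (line : String) :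
    List (String × String) × List String :=
  if line ∈ knownLabels then (st.1, st.2 ++ [line])
  else (st.1 ++ (evens st.2).zip (odds st.2 ++ [line]), [])

def pairwise_mechanical_findings_py_alt (lines : List String) : List (String × String) :=
  let st := lines.foldl pwB_step ([], [])
  st.1 ++ (evens st.2).zip (odds st.2)

-- ===== PRECONDITION & SPEC =====
def Spec_pairwise_mechanical_findings_py (lines : List String) (out : List (String × String)) : Prop := out = pairwise_mechanical_findings_py_alt lines
instance (lines : List String) (out : List (String × String)) : Decidable (Spec_pairwise_mechanical_findings_py lines out) := by unfold Spec_pairwise_mechanical_findings_py; infer_instance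

-- ===== CLAIM (what is proved, stated in full; the proofs are below) =====
def Claim_equal_pairwise_mechanical_findings_py : Prop := ∀ (lines : List String), Dom_pairwise_mechanical_findings_py lines → Spec_pairwise_mechanical_findings_py lines (pairwise_mechanical_findings_py lines)

-- ===== LEMMAS AND PROOFS =====

-- Proof-only reference recursion: pair a leading label with its successor, else skip.
def pwRef : List String → List (String × String)
  | [] => []
  | current :: rest =>
    if current ∈ knownLabels then
      match rest with
      | [] => []
      | nxt :: rest' => (current, nxt) :: pwRef rest'
    else pwRef rest

theorem pwRef_short (l : List String) (h : l.length ≤ 1) : pwRef l = [] := by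
  match l with
  | [] => rfl
  | [x] => simp [pwRef]
  | x :: y :: t => simp at h

theorem pwA_loop_eq (lines : List String) :
    ∀ k index findings, lines.length - index ≤ k →
      pwA_loop lines index findings = findings ++ pwRef (lines.drop index) := by
  intro k
  induction k with
  | zero =>
    intro index findings hk
    rw [pwA_loop]
    have : ¬ (index + 1 < lines.length) := by omega
    simp only [this, dif_neg, not_false_iff]
    rw [pwRef_short _ (by simp [List.length_drop]; omega)]
    simp
  | succ k ih =>
    intro index findings hk
    rw [pwA_loop]
    by_cases h : index + 1 < lines.length
    · simp only [h, dif_pos]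
      have hidx : index < lines.length := by omega
      have hd1 : lines.drop index = lines[index] :: lines.drop (index + 1) :=
        List.drop_eq_getElem_cons hidx
      have hd2 : lines.drop (index + 1) = lines[index + 1] :: lines.drop (index + 2) :=
        List.drop_eq_getElem_cons h
      by_cases hc : lines[index] ∈ knownLabels
      · simp only [hc, not_true, if_neg, not_false_iff]
        rw [ih (index + 2) (findings ++ [(lines[index], lines[index + 1])]) (by omega)]
        rw [hd1, hd2]
        simp [pwRef, hc]
      · simp only [hc, not_false_iff, ite_true]
        rw [ih (index + 1) findings (by omega), hd1]
        conv_rhs => rw [pwRef.eq_def]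
        simp [hc]
    · simp only [h, dif_neg, not_false_iff]
      rw [pwRef_short _ (by simp [List.length_drop]; omega)]
      simp

theorem evens_cons {α : Type} (x : α) (t : List α) : evens (x :: t) = x :: odds t := by
  cases t <;> simp [evens, odds]

theorem odds_cons_cons {α : Type} (a b : α) (t : List α) :
    odds (a :: b :: t) = b :: odds t := evens_cons b t

-- Flushing a run (all labels) at end of input yields exactly pwRef of the run.
theorem flush_final_eq : ∀ (run : List String), (∀ x ∈ run, x ∈ knownLabels) →
    (evens run).zip (odds run) = pwRef run
  | [], _ => rfl
  | [r], h => by simp [evens, odds, pwRef, h r (by simp)]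
  | r0 :: r1 :: t, h => by
      have := flush_final_eq t (fun x hx => h x (by simp [hx]))
      simp [evens, odds_cons_cons, pwRef, h r0 (by simp), this]

-- Flushing a run terminated by a non-label line.
theorem flush_mid_eq : ∀ (run : List String) (x : String) (rest : List String),
    (∀ y ∈ run, y ∈ knownLabels) → x ∉ knownLabels →
    (evens run).zip (odds run ++ [x]) ++ pwRef rest = pwRef (run ++ x :: rest)
  | [], x, rest, _, hx => by
      conv_rhs => rw [pwRef.eq_def]
      simp [evens, odds, hx]
  | [r], x, rest, h, hx => by simp [evens, odds, pwRef, h r (by simp)]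
  | r0 :: r1 :: t, x, rest, h, hx => by
      have := flush_mid_eq t x rest (fun y hy => h y (by simp [hy])) hx
      simp [evens, odds_cons_cons, pwRef, h r0 (by simp), this]

-- Loop invariant: the fold from state (acc, run) — run all labels — produces
-- acc followed by pwRef of run ++ remaining input.
theorem pwB_fold_eq : ∀ (rest run : List String) (acc : List (String × String)),
    (∀ x ∈ run, x ∈ knownLabels) →
    (let st := rest.foldl pwB_step (acc, run)
     st.1 ++ (evens st.2).zip (odds st.2)) = acc ++ pwRef (run ++ rest) := by
  intro rest
  induction rest with
  | nil =>
    intro run acc h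
    simp only [List.foldl_nil, List.append_nil]
    rw [flush_final_eq run h]
  | cons x rest ih =>
    intro run acc h
    simp only [List.foldl_cons]
    by_cases hx : x ∈ knownLabels
    · simp only [pwB_step, hx, if_pos]
      rw [ih (run ++ [x]) acc (by intro y hy; rcases List.mem_append.1 hy with h1 | h1
                                  · exact h y h1
                                  · simp at h1; subst h1; exact hx)]
      simp
    · simp only [pwB_step, hx, if_neg, not_false_iff]
      rw [ih [] _ (by simp)]
      simp only [List.nil_append, List.append_assoc]
      rw [flush_mid_eq run x rest h hx]

-- ===== VERDICT (by name: the statement is the Claim_ definition above) =====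
theorem pairwise_mechanical_findings_py_spec : Claim_equal_pairwise_mechanical_findings_py := by
  intro lines _
  unfold Spec_pairwise_mechanical_findings_py pairwise_mechanical_findings_py pairwise_mechanical_findings_py_alt
  rw [pwA_loop_eq lines lines.length 0 [] (by omega)]
  rw [pwB_fold_eq lines [] [] (by simp)]
  simp
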